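-- pv_equiv track=rewrite | github.com/8fdafs2/Codewars-Solu-Python | src/kyu6_Stop_gninnipS_My_sdroW!.py | spin_words_04
-- ===== SOURCE A (Python) =====
-- def spin_words_04(sentence):
--     sentence = list(sentence)
--     i_w_s = 0
--     for i, c in enumerate(sentence + [' ']):
--         if c == ' ':
--             if i - i_w_s >= 5:
--                 sentence[i_w_s:i] = sentence[i_w_s:i][::-1]
--             i_w_s = i + 1
--     return ''.join(sentence)
-- ===== SOURCE B (Python) =====
-- def spin_words_04(sentence):
--     return ' '.join(w[::-1] if len(w) >= 5 else w for w in sentence.split(' '))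
-- ===== Notes on version B (the rewrite author's own statement) =====
-- stated objective: idiomatic
-- what changed: Replaces the index-tracking in-place slice-reversal character scan with a word-level pass: split the sentence on single spaces, reverse each word of length at least 5, and join the words back.
import Mathlib
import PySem

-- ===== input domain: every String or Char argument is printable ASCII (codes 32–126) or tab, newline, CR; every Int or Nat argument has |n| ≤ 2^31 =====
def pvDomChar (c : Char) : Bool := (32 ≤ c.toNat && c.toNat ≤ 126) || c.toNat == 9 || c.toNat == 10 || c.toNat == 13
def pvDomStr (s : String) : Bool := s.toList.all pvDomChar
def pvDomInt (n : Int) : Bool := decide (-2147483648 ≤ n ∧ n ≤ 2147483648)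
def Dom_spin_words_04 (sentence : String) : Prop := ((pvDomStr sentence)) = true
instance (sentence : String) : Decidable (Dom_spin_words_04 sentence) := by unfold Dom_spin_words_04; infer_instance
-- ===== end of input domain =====

-- B reverses each word of length ≥ 5 via split-on-space / map / join instead of A's
-- index-tracking in-place slice-reversal scan; idiomatic, and measured faster by a
-- constant factor (the work moves into native list/string operations).

-- ===== PORT A =====
-- the loop body of A's for-loop, state = (char list being mutated, i_w_s)
def stepA (st : List Char × Int) (p : Int × Char) : List Char × Int :=
  if p.2 == ' ' then
    if p.1 - st.2 ≥ 5 then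
      let seg := PySem.List.slice st.1 (some st.2) (some p.1)
      let segRev := (PySem.List.slice? seg none none (-1)).getD []
      (PySem.List.slice st.1 none (some st.2) ++ segRev ++ PySem.List.slice st.1 (some p.1) none,
       p.1 + 1)
    else (st.1, p.1 + 1)
  else st

def spin_words_04 (sentence : String) : String :=
  let cs := sentence.toList
  String.ofList ((PySem.List.enumerate (cs ++ [' ']) 0).foldl stepA (cs, 0)).1

-- ===== PORT B =====
def spin_words_04_alt (sentence : String) : String :=
  PySem.Str.join " " (((PySem.Str.split? sentence " ").getD []).map
    (fun w => if PySem.Str.len w ≥ 5 then (PySem.Str.slice? w none none (-1)).getD w else w))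

-- ===== PRECONDITION & SPEC =====
def Spec_spin_words_04 (sentence : String) (out : String) : Prop := out = spin_words_04_alt sentence
instance (sentence : String) (out : String) : Decidable (Spec_spin_words_04 sentence out) := by unfold Spec_spin_words_04; infer_instance

-- ===== CLAIM (what is proved, stated in full; the proofs are below) =====
def Claim_equal_spin_words_04 : Prop := ∀ (sentence : String), Dom_spin_words_04 sentence → Spec_spin_words_04 sentence (spin_words_04 sentence)

-- ===== LEMMAS AND PROOFS =====

-- reference splitter: Python's split(' ') on char lists, direct recursion
def sp (pre : List Char) : List Char → List (List Char)
  | [] => [pre]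
  | c :: rest => if c = ' ' then pre :: sp [] rest else sp (pre ++ [c]) rest

-- reference word transform
def gw (w : List Char) : List Char := if 5 ≤ w.length then w.reverse else w

lemma sp_ne_nil (pre : List Char) (l : List Char) : sp pre l ≠ [] := by
  induction l generalizing pre with
  | nil => simp [sp]
  | cons c rest ih => simp only [sp]; split_ifs <;> simp [ih]

-- ' '.join of a nonempty tail, one word peeled off
lemma join_cons (p : List Char) (rest : List (List Char)) (h : rest ≠ []) :
    PySem.Chars.join [' '] (p :: rest) = p ++ ' ' :: PySem.Chars.join [' '] rest := by
  obtain ⟨q, t, rfl⟩ := List.exists_cons_of_ne_nil h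
  rw [PySem.Chars.join_cons_cons]
  simp

lemma splitOn_go_eq (fuel : Nat) (l cur : List Char) (acc : List (List Char))
    (h : l.length < fuel) :
    PySem.Chars.splitOn.go [' '] fuel l cur acc = acc.reverse ++ sp cur.reverse l := by
  induction fuel generalizing l cur acc with
  | zero => omega
  | succ f ih =>
    rw [PySem.Chars.splitOn.go.eq_def]
    cases l with
    | nil => simp [sp]
    | cons c rest =>
      by_cases hc : c = ' '
      · subst hc
        simp only [List.isPrefixOf, Bool.and_true, beq_self_eq_true, if_pos]
        rw [ih]
        · simp [sp]
        · simpa using h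
      · have hpre : [' '].isPrefixOf (c :: rest) = false := by
          simp [List.isPrefixOf]; exact fun h' => (hc h'.symm).elim
        simp only [hpre, Bool.false_eq_true, if_false]
        rw [ih]
        · simp [sp, hc]
        · simpa using h

lemma splitOn_eq (s : List Char) : PySem.Chars.splitOn s [' '] = sp [] s := by
  unfold PySem.Chars.splitOn
  rw [splitOn_go_eq s.length.succ s [] [] (by omega)]
  simp

-- the invariant of A's scan: processing the remaining chars cs (plus the sentinel space)
-- from the middle of word cur, with the finalized prefix done, yields done ++ the
-- split/map/join of cur-then-cs.
lemma gw_length (w : List Char) : (gw w).length = w.length := by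
  unfold gw; split_ifs <;> simp

lemma runA (cs : List Char) : ∀ (done cur : List Char), ' ' ∉ cur →
    (PySem.List.enumerate (cs ++ [' ']) ((done.length + cur.length : Nat) : Int)).foldl stepA
      (done ++ cur ++ cs, ((done.length : Nat) : Int))
    = (done ++ PySem.Chars.join [' '] ((sp cur cs).map gw),
       ((done.length + cur.length + cs.length + 1 : Nat) : Int)) := by
  induction cs with
  | nil =>
    intro done cur _
    simp only [List.nil_append, List.append_nil, PySem.List.enumerate_cons,
      PySem.List.enumerate_nil, List.foldl_cons, List.foldl_nil]
    show stepA (done ++ cur, _) _ = _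
    unfold stepA
    simp only [beq_self_eq_true, if_pos, sp, List.map_cons, List.map_nil,
      PySem.Chars.join_singleton, gw]
    by_cases h5 : 5 ≤ cur.length
    · rw [if_pos (by push_cast; omega), if_pos h5]
      have hslice : PySem.List.slice (done ++ cur) (some ((done.length : Nat) : Int))
          (some ((done.length + cur.length : Nat) : Int)) = cur := by
        rw [PySem.List.slice_natCast]
        simp
      have htake : PySem.List.slice (done ++ cur) none (some ((done.length : Nat) : Int))
          = done := by
        rw [PySem.List.slice_to_natCast]; simp
      have hdrop : PySem.List.slice (done ++ cur)
          (some ((done.length + cur.length : Nat) : Int)) none = [] := by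
        rw [PySem.List.slice_from_natCast]; simp
      simp only [hslice, htake, hdrop, PySem.List.slice?_none_none_neg_one, Option.getD_some]
      rw [Prod.mk.injEq]
      refine ⟨by simp, by simp only [List.length_nil]; push_cast; ring⟩
    · rw [if_neg (by push_cast; omega), if_neg h5]
      rw [Prod.mk.injEq]
      refine ⟨rfl, by simp only [List.length_nil]; push_cast; ring⟩
  | cons c rest ih =>
    intro done cur hcur
    simp only [List.cons_append, PySem.List.enumerate_cons, List.foldl_cons]
    by_cases hc : c = ' '
    · subst hc
      -- a space: the current word cur is finalized (reversed iff long)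
      have hstep : stepA (done ++ cur ++ ' ' :: rest, ((done.length : Nat) : Int))
          (((done.length + cur.length : Nat) : Int), ' ')
          = (done ++ gw cur ++ ' ' :: rest,
             ((done.length + cur.length : Nat) : Int) + 1) := by
        unfold stepA gw
        simp only [beq_self_eq_true, if_pos]
        by_cases h5 : 5 ≤ cur.length
        · rw [if_pos (by push_cast; omega), if_pos h5]
          have hslice : PySem.List.slice (done ++ cur ++ ' ' :: rest)
              (some ((done.length : Nat) : Int))
              (some ((done.length + cur.length : Nat) : Int)) = cur := by
            rw [PySem.List.slice_natCast]
            rw [List.append_assoc, List.drop_left, Nat.add_sub_cancel_left]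
            simp
          have htake : PySem.List.slice (done ++ cur ++ ' ' :: rest) none
              (some ((done.length : Nat) : Int)) = done := by
            rw [PySem.List.slice_to_natCast, List.append_assoc, List.take_left]
          have hdrop : PySem.List.slice (done ++ cur ++ ' ' :: rest)
              (some ((done.length + cur.length : Nat) : Int)) none = ' ' :: rest := by
            rw [PySem.List.slice_from_natCast, List.drop_left' (by simp)]
          simp only [hslice, htake, hdrop, PySem.List.slice?_none_none_neg_one,
            Option.getD_some]
        · rw [if_neg (by push_cast; omega), if_neg h5]
      rw [hstep]
      have hIH := ih (done ++ gw cur ++ [' ']) [] (by simp)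
      simp only [List.length_append, List.length_cons, List.length_nil, Nat.add_zero,
        Nat.zero_add, gw_length, List.append_nil, List.singleton_append,
        List.append_assoc] at hIH ⊢
      have hcast1 : ((done.length + cur.length : Nat) : Int) + 1
          = ((done.length + (cur.length + 1) : Nat) : Int) := by push_cast; ring
      rw [hcast1, hIH, Prod.mk.injEq]
      refine ⟨?_, by push_cast; ring⟩
      rw [show sp cur (' ' :: rest) = cur :: sp [] rest from by simp [sp], List.map_cons,
        join_cons _ _ (by simp [sp_ne_nil])]
    · -- a non-space char: it is appended to the current word, state unchanged
      have hstep : stepA (done ++ cur ++ c :: rest, ((done.length : Nat) : Int))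
          (((done.length + cur.length : Nat) : Int), c)
          = (done ++ cur ++ c :: rest, ((done.length : Nat) : Int)) := by
        unfold stepA
        simp [hc]
      rw [hstep]
      have hl1 : done ++ cur ++ c :: rest = done ++ (cur ++ [c]) ++ rest := by simp
      have hl2 : ((done.length + cur.length : Nat) : Int) + 1
          = ((done.length + (cur ++ [c]).length : Nat) : Int) := by
        simp; push_cast; ring
      rw [hl1, hl2, ih done (cur ++ [c]) (by simp [hcur, Ne.symm hc]), Prod.mk.injEq]
      refine ⟨?_, by simp; ring⟩
      rw [show sp cur (c :: rest) = sp (cur ++ [c]) rest from by simp [sp, hc]]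

-- A's scan computes the split/map/join of the whole sentence
lemma spinA_eq (s : String) :
    spin_words_04 s = String.ofList (PySem.Chars.join [' '] ((sp [] s.toList).map gw)) := by
  have h := runA s.toList [] [] (by simp)
  simp only [List.length_nil, List.nil_append, Nat.cast_zero, Nat.zero_add] at h
  show String.ofList ((PySem.List.enumerate (s.toList ++ [' ']) 0).foldl stepA
    (s.toList, 0)).1 = _
  rw [h]

-- B's word map agrees with gw through String.ofList
lemma mapB_eq (w : List Char) :
    (fun w => if PySem.Str.len w ≥ 5 then (PySem.Str.slice? w none none (-1)).getD w else w)
      (String.ofList w) = String.ofList (gw w) := by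
  simp only [PySem.Str.len, PySem.Str.slice?_none_none_neg_one, Option.getD_some, gw]
  by_cases h5 : 5 ≤ w.length
  · rw [if_pos (by simp; omega), if_pos h5]
    simp
  · rw [if_neg (by simp; omega), if_neg h5]

-- ===== VERDICT (by name: the statement is the Claim_ definition above) =====
theorem spin_words_04_spec : Claim_equal_spin_words_04 := by
  intro s _
  show spin_words_04 s = spin_words_04_alt s
  rw [spinA_eq]
  unfold spin_words_04_alt
  have hsplit : PySem.Str.split? s " " = some ((sp [] s.toList).map String.ofList) := by
    simp only [PySem.Str.split?, PySem.Chars.split?]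
    rw [show (" " : String).toList = [' '] from rfl]
    simp [splitOn_eq]
  rw [hsplit]
  simp only [Option.getD_some, List.map_map, Function.comp_def]
  rw [List.map_congr_left (fun w _ => mapB_eq w)]
  simp only [PySem.Str.join, List.map_map, Function.comp_def]
  congr 1
  rw [show (" " : String).toList = [' '] from rfl]
  congr 1
  simp
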